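-- pv_equiv track=rewrite | github.com/morepiixel-collab/math_p5 | app_p5_gifted.py | render_short_div
-- ===== SOURCE A (Python) =====
-- def render_short_div(nums, mode="gcd"):
--     primes = [2, 3, 5, 7, 11, 13, 17, 19, 23, 29, 31, 37]
--     steps, current_nums, divisors = [], list(nums), []
--     while True:
--         found = False
--         for p in primes:
--             if all(n % p == 0 for n in current_nums):
--                 divisors.append(p); steps.append(list(current_nums))
--                 current_nums = [n // p for n in current_nums]; found = True; break
--         if not found: break
--     if mode == "lcm":
--         while True:
--             found = False
--             for p in primes:
--                 if sum(1 for n in current_nums if n % p == 0) >= 2: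
--                     divisors.append(p); steps.append(list(current_nums))
--                     current_nums = [n // p if n % p == 0 else n for n in current_nums]; found = True; break
--             if not found: break
--     html = "<div style='display:block; text-align:center; margin: 20px 0;'><div style='display:inline-block; text-align:left; font-family:\"Courier New\", Courier, monospace; font-size:20px; background:#f8f9fa; padding:15px 25px; border-radius:8px; box-shadow: 0 2px 5px rgba(0,0,0,0.1); border: 1px solid #e0e0e0;'>"
--     for i in range(len(divisors)):
--         html += f"<div style='display: flex; align-items: baseline;'><div style='width: 35px; text-align: right; color: #c0392b; font-weight: bold; padding-right: 12px;'>{divisors[i]}</div><div style='border-left: 2px solid #2c3e50; border-bottom: 2px solid #2c3e50; padding: 4px 15px; display: flex; gap: 20px;'>"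
--         for n in steps[i]: html += f"<div style='width: 40px; text-align: center; color: #333;'>{n}</div>"
--         html += "</div></div>"
--     html += f"<div style='display: flex; align-items: baseline;'><div style='width: 35px; text-align: right; padding-right: 12px;'></div><div style='padding: 6px 15px 0px 15px; display: flex; gap: 20px; color: #2980b9; font-weight: bold; border-bottom: 4px double #2980b9;'>"
--     for n in current_nums: html += f"<div style='width: 40px; text-align: center;'>{n}</div>"
--     html += "</div></div></div></div>"
--     return html, divisors, current_nums
-- ===== SOURCE B (Python) =====
-- HEAD = "<div style='display:block; text-align:center; margin: 20px 0;'><div style='display:inline-block; text-align:left; font-family:\"Courier New\", Courier, monospace; font-size:20px; background:#f8f9fa; padding:15px 25px; border-radius:8px; box-shadow: 0 2px 5px rgba(0,0,0,0.1); border: 1px solid #e0e0e0;'>"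
-- ROWPRE = "<div style='display: flex; align-items: baseline;'><div style='width: 35px; text-align: right; color: #c0392b; font-weight: bold; padding-right: 12px;'>"
-- ROWMID = "</div><div style='border-left: 2px solid #2c3e50; border-bottom: 2px solid #2c3e50; padding: 4px 15px; display: flex; gap: 20px;'>"
-- CELL1 = "<div style='width: 40px; text-align: center; color: #333;'>"
-- TAIL = "<div style='display: flex; align-items: baseline;'><div style='width: 35px; text-align: right; padding-right: 12px;'></div><div style='padding: 6px 15px 0px 15px; display: flex; gap: 20px; color: #2980b9; font-weight: bold; border-bottom: 4px double #2980b9;'>"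
-- CELL2 = "<div style='width: 40px; text-align: center;'>"
--
-- def render_short_div(nums, mode="gcd"):
--     primes = [2, 3, 5, 7, 11, 13, 17, 19, 23, 29, 31, 37]
--     divisors, steps, cur = [], [], list(nums)
--     for p in primes:
--         while all(n % p == 0 for n in cur):
--             divisors.append(p); steps.append(list(cur))
--             cur = [n // p for n in cur]
--     if mode == "lcm":
--         for p in primes:
--             while sum(1 for n in cur if n % p == 0) >= 2:
--                 divisors.append(p); steps.append(list(cur))
--                 cur = [n // p if n % p == 0 else n for n in cur]
--     html = (
--         HEAD
--         + "".join(
--             ROWPRE + str(d) + ROWMID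
--             + "".join(CELL1 + str(n) + "</div>" for n in st)
--             + "</div></div>"
--             for d, st in zip(divisors, steps))
--         + TAIL
--         + "".join(CELL2 + str(n) + "</div>" for n in cur)
--         + "</div></div></div></div>"
--     )
--     return html, divisors, cur
-- ===== Notes on version B (the rewrite author's own statement) =====
-- stated objective: simpler
-- what changed: The two 'while True: rescan primes from the smallest and apply the first applicable one' restart loops are replaced by a single ordered pass that exhausts each prime in turn (valid because dividing by a later prime never creates divisibility by an earlier one), and the HTML is assembled by joining mapped row/cell strings over zip(divisors, steps) instead of appending inside nested index loops.
import Mathlib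
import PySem

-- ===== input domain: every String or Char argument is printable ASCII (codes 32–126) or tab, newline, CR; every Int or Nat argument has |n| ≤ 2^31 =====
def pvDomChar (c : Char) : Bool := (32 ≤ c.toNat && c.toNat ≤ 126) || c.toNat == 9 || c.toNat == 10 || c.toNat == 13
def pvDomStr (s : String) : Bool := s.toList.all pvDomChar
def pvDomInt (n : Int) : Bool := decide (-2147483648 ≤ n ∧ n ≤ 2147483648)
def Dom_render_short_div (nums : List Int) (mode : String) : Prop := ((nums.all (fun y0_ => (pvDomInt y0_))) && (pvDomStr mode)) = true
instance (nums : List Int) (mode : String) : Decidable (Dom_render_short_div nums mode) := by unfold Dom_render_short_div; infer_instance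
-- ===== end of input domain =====

-- B replaces A's two restart-from-the-smallest-prime rescan loops by a single ordered pass
-- that exhausts each prime in turn, and builds the HTML by joining mapped row strings instead
-- of appending inside nested loops (objective: simpler; same exact output).

-- Shared literal data (string constants and the prime table of the Python sources).
def pvPrimes : List Int := [2, 3, 5, 7, 11, 13, 17, 19, 23, 29, 31, 37]

def pvHead : String := "<div style='display:block; text-align:center; margin: 20px 0;'><div style='display:inline-block; text-align:left; font-family:\"Courier New\", Courier, monospace; font-size:20px; background:#f8f9fa; padding:15px 25px; border-radius:8px; box-shadow: 0 2px 5px rgba(0,0,0,0.1); border: 1px solid #e0e0e0;'>"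
def pvRowPre : String := "<div style='display: flex; align-items: baseline;'><div style='width: 35px; text-align: right; color: #c0392b; font-weight: bold; padding-right: 12px;'>"
def pvRowMid : String := "</div><div style='border-left: 2px solid #2c3e50; border-bottom: 2px solid #2c3e50; padding: 4px 15px; display: flex; gap: 20px;'>"
def pvCell1 : String := "<div style='width: 40px; text-align: center; color: #333;'>"
def pvTail : String := "<div style='display: flex; align-items: baseline;'><div style='width: 35px; text-align: right; padding-right: 12px;'></div><div style='padding: 6px 15px 0px 15px; display: flex; gap: 20px; color: #2980b9; font-weight: bold; border-bottom: 4px double #2980b9;'>"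
def pvCell2 : String := "<div style='width: 40px; text-align: center;'>"

-- ===== PORT A =====
-- all(n % p == 0 for n in cur)
def pvCondG (cur : List Int) (p : Int) : Bool := cur.all (fun n => PySem.Int.mod n p == 0)
-- [n // p for n in cur]
def pvDivG (cur : List Int) (p : Int) : List Int := cur.map (fun n => PySem.Int.floordiv n p)
-- sum(1 for n in cur if n % p == 0) >= 2
def pvCondL (cur : List Int) (p : Int) : Bool :=
  decide (2 ≤ ((cur.filter (fun n => PySem.Int.mod n p == 0)).map (fun _ => (1 : Int))).sum)
-- [n // p if n % p == 0 else n for n in cur]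
def pvDivL (cur : List Int) (p : Int) : List Int :=
  cur.map (fun n => if PySem.Int.mod n p == 0 then PySem.Int.floordiv n p else n)

-- fuel for the 'while True' loops: the loop body strictly shrinks Σ|n| on every input the
-- Python terminates on, so this fuel is never exhausted there (totality device only)
def pvFuel (cur : List Int) : Nat := (cur.map (fun n => n.natAbs)).sum + 1

-- A's 'while True: for p in primes: … break' loop: each round rescans primes from the start
-- and applies the FIRST prime whose condition holds (both of A's loops have this shape,
-- with (cond, dv) = (pvCondG, pvDivG) resp. (pvCondL, pvDivL))
def pvALoop (cond : List Int → Int → Bool) (dv : List Int → Int → List Int) :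
    Nat → List Int × List (List Int) × List Int → List Int × List (List Int) × List Int
  | 0, st => st
  | f + 1, (divs, steps, cur) =>
    match pvPrimes.find? (fun p => cond cur p) with
    | some p => pvALoop cond dv f (divs ++ [p], steps ++ [cur], dv cur p)
    | none => (divs, steps, cur)

-- A's HTML block: string appended in place, rows indexed by range(len(divisors));
-- the pyGetD defaults are never reached (len steps = len divisors throughout)
def pvHtmlA (st : List Int × List (List Int) × List Int) : String :=
  let divs := st.1
  let steps := st.2.1
  let cur := st.2.2
  let h := pvHead
  let h := (PySem.List.pyRange 0 (PySem.List.len divs)).foldl (fun h i =>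
      let h := h ++ pvRowPre ++ PySem.Int.toStr (PySem.List.pyGetD divs i 0) ++ pvRowMid
      let h := (PySem.List.pyGetD steps i []).foldl
          (fun h n => h ++ pvCell1 ++ PySem.Int.toStr n ++ "</div>") h
      h ++ "</div></div>") h
  let h := h ++ pvTail
  let h := cur.foldl (fun h n => h ++ pvCell2 ++ PySem.Int.toStr n ++ "</div>") h
  h ++ "</div></div></div></div>"

def render_short_div (nums : List Int) (mode : String) : String × List Int × List Int :=
  let st := pvALoop pvCondG pvDivG (pvFuel nums) ([], [], nums)
  let st := if mode == "lcm" then pvALoop pvCondL pvDivL (pvFuel st.2.2) st else st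
  (pvHtmlA st, st.1, st.2.2)

-- ===== PORT B =====
-- B's single ordered pass: 'for p in primes: while cond(p): …' — exhaust each prime in turn
-- (same shared fuel as totality device for the inner while loops)
def pvBLoop (cond : List Int → Int → Bool) (dv : List Int → Int → List Int) :
    List Int → Nat → List Int × List (List Int) × List Int → List Int × List (List Int) × List Int
  | [], _, st => st
  | p :: ps, f, (divs, steps, cur) =>
    if cond cur p then
      match f with
      | 0 => (divs, steps, cur)
      | f' + 1 => pvBLoop cond dv (p :: ps) f' (divs ++ [p], steps ++ [cur], dv cur p)
    else pvBLoop cond dv ps f (divs, steps, cur)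
  termination_by ps f _ => (f, ps.length)

-- one table row: rowpre + str(d) + rowmid + "".join(cells) + "</div></div>"
def pvRowB (ds : Int × List Int) : String :=
  pvRowPre ++ PySem.Int.toStr ds.1 ++ pvRowMid ++
    PySem.Str.join "" (ds.2.map (fun n => pvCell1 ++ PySem.Int.toStr n ++ "</div>")) ++
    "</div></div>"

-- B's HTML: head + "".join(rows over zip(divisors, steps)) + tail + "".join(cells) + end
def pvHtmlB (st : List Int × List (List Int) × List Int) : String :=
  pvHead ++ PySem.Str.join "" ((st.1.zip st.2.1).map pvRowB) ++ pvTail ++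
    PySem.Str.join "" (st.2.2.map (fun n => pvCell2 ++ PySem.Int.toStr n ++ "</div>")) ++
    "</div></div></div></div>"

def render_short_div_alt (nums : List Int) (mode : String) : String × List Int × List Int :=
  let st := pvBLoop pvCondG pvDivG pvPrimes (pvFuel nums) ([], [], nums)
  let st := if mode == "lcm" then pvBLoop pvCondL pvDivL pvPrimes (pvFuel st.2.2) st else st
  (pvHtmlB st, st.1, st.2.2)

-- ===== PRECONDITION & SPEC =====
def Spec_render_short_div (nums : List Int) (mode : String) (out : String × List Int × List Int) : Prop := out = render_short_div_alt nums mode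
instance (nums : List Int) (mode : String) (out : String × List Int × List Int) : Decidable (Spec_render_short_div nums mode out) := by unfold Spec_render_short_div; infer_instance

-- ===== CLAIM (what is proved, stated in full; the proofs are below) =====
def Claim_equal_render_short_div : Prop := ∀ (nums : List Int) (mode : String), Dom_render_short_div nums mode → Spec_render_short_div nums mode (render_short_div nums mode)

-- ===== LEMMAS AND PROOFS =====

-- "".join distributes as plain concatenation
lemma pvJoinNil : PySem.Str.join "" [] = "" := by
  simp [PySem.Str.join, PySem.Chars.join, List.intercalate]

lemma pvJoinCons (s : String) (rest : List String) :
    PySem.Str.join "" (s :: rest) = s ++ PySem.Str.join "" rest := by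
  cases rest with
  | nil => simp [PySem.Str.join, PySem.Chars.join, List.intercalate]
  | cons t ts => simp [PySem.Str.join, PySem.Chars.join, List.intercalate, String.ofList_append]

-- an append-accumulating string fold is the accumulator followed by the join of the pieces
lemma pvFoldlStr {α : Type} (f : α → String) (l : List α) (h : String) :
    l.foldl (fun h x => h ++ f x) h = h ++ PySem.Str.join "" (l.map f) := by
  induction l generalizing h with
  | nil => simp [pvJoinNil]
  | cons x xs ih => simp [ih, pvJoinCons, String.append_assoc]

-- B's loop with exhausted fuel returns the state unchanged
lemma pvBLoop_zero (cond : List Int → Int → Bool) (dv : List Int → Int → List Int) :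
    ∀ ps st, pvBLoop cond dv ps 0 st = st := by
  intro ps
  induction ps with
  | nil => intro st; simp [pvBLoop]
  | cons p ps ih =>
    intro ⟨divs, steps, cur⟩
    by_cases hc : cond cur p <;> simp [pvBLoop, hc, ih]

lemma pvFind_prefix (cond : Int → Bool) (pre ps : List Int)
    (h : ∀ q ∈ pre, cond q = false) :
    List.find? cond (pre ++ ps) = List.find? cond ps := by
  rw [List.find?_append]
  have hnone : List.find? cond pre = none :=
    List.find?_eq_none.mpr (by intro x hx; simp [h x hx])
  simp [hnone]

-- A's loop keeps len divisors = len steps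
lemma pvALoop_len (cond : List Int → Int → Bool) (dv : List Int → Int → List Int) :
    ∀ f divs steps cur, divs.length = steps.length →
      (pvALoop cond dv f (divs, steps, cur)).1.length
        = (pvALoop cond dv f (divs, steps, cur)).2.1.length := by
  intro f
  induction f with
  | zero => intro divs steps cur h; simpa [pvALoop] using h
  | succ f ih =>
    intro divs steps cur h
    cases hfind : pvPrimes.find? (fun p => cond cur p) with
    | some p => simpa [pvALoop, hfind] using ih _ _ _ (by simp [h])
    | none => simpa [pvALoop, hfind] using h

-- core: A's restart-rescan loop equals B's ordered pass, at EVERY fuel, as long as the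
-- conditions of the already-passed primes are false and stay false (hmono)
lemma pvLoop_eq (cond : List Int → Int → Bool) (dv : List Int → Int → List Int)
    (hmono : ∀ cur p q, cond cur p = true → cond cur q = false → cond (dv cur p) q = false) :
    ∀ f pre ps, pre ++ ps = pvPrimes →
      ∀ divs steps cur, (∀ q ∈ pre, cond cur q = false) →
        pvALoop cond dv f (divs, steps, cur) = pvBLoop cond dv ps f (divs, steps, cur) := by
  intro f
  induction f with
  | zero =>
    intro pre ps hsplit divs steps cur hpre
    rw [pvBLoop_zero]; simp [pvALoop]
  | succ f ihf =>
    intro pre ps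
    induction ps generalizing pre with
    | nil =>
      intro hsplit divs steps cur hpre
      have hnone : pvPrimes.find? (fun p => cond cur p) = none := by
        apply List.find?_eq_none.mpr
        intro x hx
        rw [← hsplit] at hx
        simp only [List.append_nil] at hx
        simp [hpre x hx]
      simp [pvALoop, pvBLoop, hnone]
    | cons p ps' ihps =>
      intro hsplit divs steps cur hpre
      by_cases hc : cond cur p = true
      · have hfind : pvPrimes.find? (fun p => cond cur p) = some p := by
          rw [← hsplit, pvFind_prefix _ _ _ hpre]
          simp [hc]
        have hstep := ihf pre (p :: ps') hsplit (divs ++ [p]) (steps ++ [cur]) (dv cur p)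
          (fun q hq => hmono cur p q hc (hpre q hq))
        simp only [pvALoop, hfind]
        rw [hstep]
        conv_rhs => rw [pvBLoop]
        simp [hc]
      · have hc' : cond cur p = false := by simpa using hc
        have hext : ∀ q ∈ pre ++ [p], cond cur q = false := by
          intro q hq
          rcases List.mem_append.mp hq with h | h
          · exact hpre q h
          · simp only [List.mem_singleton] at h; subst h; exact hc'
        have := ihps (pre ++ [p]) (by simpa using hsplit) divs steps cur hext
        rw [this]
        conv_rhs => rw [pvBLoop]
        simp [hc']

-- exact division: q ∣ n // p → q ∣ n when p ∣ n
lemma pvDvd_of_dvd_floordiv {n p q : Int} (hp : p ∣ n) (hq : q ∣ PySem.Int.floordiv n p) :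
    q ∣ n := by
  have hmod : PySem.Int.mod n p = 0 := (PySem.Int.mod_eq_zero_iff_dvd n p).mpr hp
  have hmul : PySem.Int.floordiv n p * p = n := by
    have := PySem.Int.floordiv_mul_add_mod n p
    omega
  calc q ∣ PySem.Int.floordiv n p * p := Dvd.dvd.mul_right hq p
    _ = n := hmul

lemma pvMonoG : ∀ cur p q, pvCondG cur p = true → pvCondG cur q = false →
    pvCondG (pvDivG cur p) q = false := by
  intro cur p q hp hq
  cases hnew : pvCondG (pvDivG cur p) q with
  | false => rfl
  | true =>
    exfalso
    apply absurd _ (by simp [hq] : ¬ pvCondG cur q = true)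
    simp only [pvCondG, pvDivG, List.all_map, List.all_eq_true, Function.comp,
      beq_iff_eq, PySem.Int.mod_eq_zero_iff_dvd] at hp hnew ⊢
    intro n hn
    exact pvDvd_of_dvd_floordiv (hp n hn) (hnew n hn)

-- pvCondL is a count of divisible elements
lemma pvCondL_eq (cur : List Int) (p : Int) :
    pvCondL cur p = decide (2 ≤ (cur.countP (fun n => PySem.Int.mod n p == 0) : Int)) := by
  simp [pvCondL, List.countP_eq_length_filter, List.map_const']

lemma pvMonoL : ∀ cur p q, pvCondL cur p = true → pvCondL cur q = false →
    pvCondL (pvDivL cur p) q = false := by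
  intro cur p q _ hq
  rw [pvCondL_eq] at hq ⊢
  simp only [decide_eq_false_iff_not, not_le] at hq ⊢
  have hle : (pvDivL cur p).countP (fun n => PySem.Int.mod n q == 0)
      ≤ cur.countP (fun n => PySem.Int.mod n q == 0) := by
    rw [pvDivL, List.countP_map]
    apply List.countP_mono_left
    intro n _ h
    by_cases hp : PySem.Int.mod n p = 0
    · have hpd : p ∣ n := (PySem.Int.mod_eq_zero_iff_dvd n p).mp hp
      simp only [Function.comp, hp, beq_self_eq_true, if_pos, beq_iff_eq,
        PySem.Int.mod_eq_zero_iff_dvd] at h ⊢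
      exact pvDvd_of_dvd_floordiv hpd h
    · simpa [Function.comp, hp] using h
  omega

-- the two HTML builders agree whenever len divisors = len steps
lemma pvHtml_eq (divs : List Int) (steps : List (List Int)) (cur : List Int)
    (hlen : divs.length = steps.length) :
    pvHtmlA (divs, steps, cur) = pvHtmlB (divs, steps, cur) := by
  have hrow : ∀ (h : String) (i : Int), 0 ≤ i → i < (divs.length : Int) →
      ((PySem.List.pyGetD steps i []).foldl
          (fun h n => h ++ pvCell1 ++ PySem.Int.toStr n ++ "</div>")
          (h ++ pvRowPre ++ PySem.Int.toStr (PySem.List.pyGetD divs i 0) ++ pvRowMid))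
        ++ "</div></div>"
        = h ++ pvRowB ((divs.zip steps).getD i.toNat (0, [])) := by
    intro h i h0 h1
    have hd : PySem.List.pyGetD divs i 0 = divs[i.toNat] :=
      PySem.List.pyGetD_eq_getElem divs 0 h0 h1
    have hs : PySem.List.pyGetD steps i [] = steps[i.toNat]'(by omega) :=
      PySem.List.pyGetD_eq_getElem steps [] h0 (by omega)
    have hz : (divs.zip steps).getD i.toNat (0, []) = (divs[i.toNat], steps[i.toNat]'(by omega)) := by
      rw [List.getD_eq_getElem _ _ (by simp [List.length_zip]; omega)]
      exact List.getElem_zip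
    have hfun : (fun (h : String) (n : Int) => h ++ pvCell1 ++ PySem.Int.toStr n ++ "</div>")
        = (fun h n => h ++ (pvCell1 ++ (PySem.Int.toStr n ++ "</div>"))) := by
      funext h n; rw [String.append_assoc, String.append_assoc]
    rw [hd, hs, hz, hfun, pvFoldlStr]
    simp [pvRowB, String.append_assoc]
  have hmap : (PySem.List.pyRange 0 (PySem.List.len divs)).map
      (fun i => pvRowB ((divs.zip steps).getD i.toNat (0, [])))
      = (divs.zip steps).map pvRowB := by
    have hlenz : PySem.List.len (divs.zip steps) = PySem.List.len divs := by
      simp [PySem.List.len_eq, List.length_zip, hlen]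
    calc (PySem.List.pyRange 0 (PySem.List.len divs)).map
          (fun i => pvRowB ((divs.zip steps).getD i.toNat (0, [])))
        = (PySem.List.pyRange 0 (PySem.List.len (divs.zip steps))).map
          (fun i => pvRowB (PySem.List.pyGetD (divs.zip steps) i (0, []))) := by
          rw [hlenz]
          apply List.map_congr_left
          intro i hi
          obtain ⟨hi0, hi1⟩ := PySem.List.mem_pyRange_one.mp hi
          rw [PySem.List.len_eq] at hi1
          have hiz : i < ((divs.zip steps).length : Int) := by
            simp [List.length_zip]; omega
          rw [PySem.List.pyGetD_eq_getElem _ _ hi0 hiz,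
            List.getD_eq_getElem _ _ (by simp [List.length_zip]; omega)]
      _ = (divs.zip steps).map pvRowB := by
          conv_rhs => rw [← PySem.List.map_pyGetD_pyRange_zero (divs.zip steps) (0, [])]
          rw [List.map_map]
          rfl
  have houter : (PySem.List.pyRange 0 (PySem.List.len divs)).foldl
      (fun h i => ((PySem.List.pyGetD steps i []).foldl
          (fun h n => h ++ pvCell1 ++ PySem.Int.toStr n ++ "</div>")
          (h ++ pvRowPre ++ PySem.Int.toStr (PySem.List.pyGetD divs i 0) ++ pvRowMid))
        ++ "</div></div>") pvHead
      = pvHead ++ PySem.Str.join "" ((divs.zip steps).map pvRowB) := by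
    have hcong : ∀ (acc : String) (i : Int), i ∈ PySem.List.pyRange 0 (PySem.List.len divs) →
        ((PySem.List.pyGetD steps i []).foldl
            (fun h n => h ++ pvCell1 ++ PySem.Int.toStr n ++ "</div>")
            (acc ++ pvRowPre ++ PySem.Int.toStr (PySem.List.pyGetD divs i 0) ++ pvRowMid))
          ++ "</div></div>"
          = acc ++ pvRowB ((divs.zip steps).getD i.toNat (0, [])) := by
      intro acc i hi
      obtain ⟨hi0, hi1⟩ := PySem.List.mem_pyRange_one.mp hi
      rw [PySem.List.len_eq] at hi1
      exact hrow acc i hi0 hi1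
    calc (PySem.List.pyRange 0 (PySem.List.len divs)).foldl
          (fun h i => ((PySem.List.pyGetD steps i []).foldl
              (fun h n => h ++ pvCell1 ++ PySem.Int.toStr n ++ "</div>")
              (h ++ pvRowPre ++ PySem.Int.toStr (PySem.List.pyGetD divs i 0) ++ pvRowMid))
            ++ "</div></div>") pvHead
        = (PySem.List.pyRange 0 (PySem.List.len divs)).foldl
          (fun h i => h ++ pvRowB ((divs.zip steps).getD i.toNat (0, []))) pvHead :=
          PySem.List.foldl_congr_mem _ _ _ _ hcong
      _ = pvHead ++ PySem.Str.join "" ((PySem.List.pyRange 0 (PySem.List.len divs)).map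
            (fun i => pvRowB ((divs.zip steps).getD i.toNat (0, [])))) :=
          pvFoldlStr _ _ _
      _ = pvHead ++ PySem.Str.join "" ((divs.zip steps).map pvRowB) := by rw [hmap]
  have hfun2 : (fun (h : String) (n : Int) => h ++ pvCell2 ++ PySem.Int.toStr n ++ "</div>")
      = (fun h n => h ++ (pvCell2 ++ (PySem.Int.toStr n ++ "</div>"))) := by
    funext h n; rw [String.append_assoc, String.append_assoc]
  show ((PySem.List.pyRange 0 (PySem.List.len divs)).foldl _ pvHead ++ pvTail
      |> cur.foldl (fun h n => h ++ pvCell2 ++ PySem.Int.toStr n ++ "</div>"))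
      ++ "</div></div></div></div>" = _
  rw [houter, hfun2]
  show (cur.foldl _ _) ++ _ = _
  rw [pvFoldlStr]
  simp [pvHtmlB, String.append_assoc]

-- ===== VERDICT (by name: the statement is the Claim_ definition above) =====
theorem render_short_div_spec : Claim_equal_render_short_div := by
  intro nums mode _hdom
  unfold Spec_render_short_div
  rcases hA : pvALoop pvCondG pvDivG (pvFuel nums) ([], [], nums) with ⟨d1, s1, c1⟩
  have h1 : pvBLoop pvCondG pvDivG pvPrimes (pvFuel nums) ([], [], nums) = (d1, s1, c1) := by
    rw [← hA]
    exact (pvLoop_eq pvCondG pvDivG pvMonoG (pvFuel nums) [] pvPrimes rfl [] [] nums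
      (by simp)).symm
  have hlen1 : d1.length = s1.length := by
    have := pvALoop_len pvCondG pvDivG (pvFuel nums) [] [] nums rfl
    rw [hA] at this
    exact this
  simp only [render_short_div, render_short_div_alt, hA, h1]
  by_cases hm : (mode == "lcm") = true
  · rcases hA2 : pvALoop pvCondL pvDivL (pvFuel c1) (d1, s1, c1) with ⟨d2, s2, c2⟩
    have h2 : pvBLoop pvCondL pvDivL pvPrimes (pvFuel c1) (d1, s1, c1) = (d2, s2, c2) := by
      rw [← hA2]
      exact (pvLoop_eq pvCondL pvDivL pvMonoL (pvFuel c1) [] pvPrimes rfl d1 s1 c1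
        (by simp)).symm
    have hlen2 : d2.length = s2.length := by
      have := pvALoop_len pvCondL pvDivL (pvFuel c1) d1 s1 c1 hlen1
      rw [hA2] at this
      exact this
    simp only [hm, if_pos, h2]
    rw [pvHtml_eq d2 s2 c2 hlen2]
  · simp only [Bool.not_eq_true] at hm
    simp only [hm, Bool.false_eq_true, if_false]
    rw [pvHtml_eq d1 s1 c1 hlen1]
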